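-- pv_equiv track=rewrite | github.com/masna-cufta/nfa-epsilon-simulator | nfa_simulator.py | nfa_result
-- ===== SOURCE A (Python) =====
-- from collections import deque
--
-- def process_epsilon_closure(state_set, transitions):
--     closure = set(state_set)
--     queue = deque(state_set)
--
--     while queue:
--         current = queue.popleft()
--
--         if current in transitions and '$' in transitions[current]:
--             for next_state in transitions[current]['$']:
--                 if next_state not in closure:
--                     closure.add(next_state)
--                     queue.append(next_state)
--
--     return closure
--
-- def nfa_result(inputs, start_state, transitions):
--     results = []
--
--     for input_str in inputs:
--         symbols = input_str.split(',') if input_str else []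
--         start_set = set()
--         start_set.add(start_state)
--         current_states = process_epsilon_closure(start_set, transitions)
--
--         if current_states:
--             sorted_states = sorted(current_states)
--             first_entry = ','.join(sorted_states)
--         else:
--             first_entry = '#'
--
--         result_sequence = [first_entry]
--
--         for symbol in symbols:
--             next_states = set()
--
--             for state in current_states:
--                 if state in transitions and symbol in transitions[state]:
--                     next_states.update(transitions[state][symbol])
--
--             current_states = process_epsilon_closure(next_states, transitions)
--
--             if current_states:
--                 sorted_states = sorted(current_states)
--                 new_entry = ','.join(sorted_states)
--             else:
--                 new_entry = '#'
--
--             result_sequence.append(new_entry)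
--
--         results.append('|'.join(result_sequence))
--
--     return results
-- ===== SOURCE B (Python) =====
-- def nfa_result(inputs, start_state, transitions):
--     # Saturation-based closure table: bounded round expansion instead of a worklist,
--     # a recursive per-input sequence builder, and a map over the inputs.
--     universe = {v for m in transitions.values() for v in m.get('$', [])}
--     fuel = len(universe)
--
--     def closure_of(s):
--         c = {s}
--         for _ in range(fuel):
--             c = c | {v for u in c for v in transitions.get(u, {}).get('$', [])}
--         return c
--
--     table = {s: closure_of(s) for s in transitions}
--
--     def close(states):
--         out = set()
--         for st in states:
--             out |= table.get(st, {st})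
--         return out
--
--     def fmt(states):
--         return ','.join(sorted(states)) if states else '#'
--
--     def run(cur, syms):
--         if not syms:
--             return [fmt(cur)]
--         nxt = close({v for st in cur for v in transitions.get(st, {}).get(syms[0], [])})
--         return [fmt(cur)] + run(nxt, syms[1:])
--
--     return ['|'.join(run(close({start_state}), inp.split(',') if inp else []))
--             for inp in inputs]
-- ===== Notes on version B (the rewrite author's own statement) =====
-- stated objective: alternative
-- what changed: B precomputes each state's epsilon-closure once by bounded round-based saturation (repeatedly unioning one-step epsilon targets, |targets| rounds) instead of A's per-step BFS worklist, builds each output sequence by structural recursion over the symbol list instead of A's foldl with a pair accumulator, and maps over the inputs instead of appending to a result list.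
import Mathlib
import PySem

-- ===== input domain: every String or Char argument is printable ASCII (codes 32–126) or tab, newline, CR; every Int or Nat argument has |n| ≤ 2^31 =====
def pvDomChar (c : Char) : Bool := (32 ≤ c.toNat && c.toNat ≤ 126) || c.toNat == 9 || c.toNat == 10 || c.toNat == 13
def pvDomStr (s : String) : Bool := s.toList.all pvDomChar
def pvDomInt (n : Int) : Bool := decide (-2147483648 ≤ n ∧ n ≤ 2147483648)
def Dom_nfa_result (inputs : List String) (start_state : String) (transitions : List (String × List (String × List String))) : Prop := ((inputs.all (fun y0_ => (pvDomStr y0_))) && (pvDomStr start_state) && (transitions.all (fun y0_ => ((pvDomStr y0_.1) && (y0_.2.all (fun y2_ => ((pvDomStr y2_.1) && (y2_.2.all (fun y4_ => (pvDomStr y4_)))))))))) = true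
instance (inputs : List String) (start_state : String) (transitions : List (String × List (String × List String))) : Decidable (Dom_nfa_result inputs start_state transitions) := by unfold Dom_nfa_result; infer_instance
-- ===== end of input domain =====

-- B precomputes every state's epsilon-closure once by bounded round-based saturation
-- (instead of A's per-step BFS worklist) and builds each sequence by structural recursion
-- over the symbols; objective: alternative algorithm.

-- ===== PORT A =====

-- transitions[state][sym] if both keys exist, else [] (the guarded loop body does not run)
def pvTargetsA (transitions : List (String × List (String × List String))) (state sym : String) : List String :=
  match (PySem.Dict.mk transitions).get? state with
  | none => []
  | some m =>
    match (PySem.Dict.mk m).get? sym with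
    | none => []
    | some l => l

-- all transition-target states; only used for the termination measure of the BFS loop
def pvUniv (transitions : List (String × List (String × List String))) : List String :=
  PySem.List.dedup (transitions.flatMap (fun p => p.2.flatMap (fun q => q.2)))

def pvMu (transitions : List (String × List (String × List String))) (c q : List String) : Nat :=
  ((pvUniv transitions).toFinset \ c.toFinset).card + q.length

-- the inner 'for next_state in …: if next_state not in closure: closure.add(…); queue.append(…)'
-- (Set.add on a non-member appends, so the guarded add is the guarded append)
def pvStep (c q : List String) (ts : List String) : List String × List String :=
  ts.foldl (fun p v => if v ∈ p.1 then p else (p.1 ++ [v], p.2 ++ [v])) (c, q)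

theorem pvStep_cons_mem (c q : List String) (v : String) (rest : List String) (hv : v ∈ c) :
    pvStep c q (v :: rest) = pvStep c q rest := by
  simp [pvStep, hv]

theorem pvStep_cons_not_mem (c q : List String) (v : String) (rest : List String) (hv : v ∉ c) :
    pvStep c q (v :: rest) = pvStep (c ++ [v]) (q ++ [v]) rest := by
  simp [pvStep, hv]

theorem pvTargetsA_mem_univ (t : List (String × List (String × List String))) (s sym x : String)
    (hx : x ∈ pvTargetsA t s sym) : x ∈ pvUniv t := by
  unfold pvTargetsA at hx
  cases h1 : (PySem.Dict.mk t).get? s with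
  | none => simp [h1] at hx
  | some m =>
    cases h2 : (PySem.Dict.mk m).get? sym with
    | none => simp [h1, h2] at hx
    | some l =>
      simp only [h1, h2] at hx
      have hm : (s, m) ∈ t := PySem.Dict.mem_items_of_get?_eq_some _ h1
      have hl : (sym, l) ∈ m := PySem.Dict.mem_items_of_get?_eq_some _ h2
      unfold pvUniv
      rw [PySem.List.mem_dedup]
      refine List.mem_flatMap.2 ⟨(s, m), hm, List.mem_flatMap.2 ⟨(sym, l), hl, hx⟩⟩

theorem pvStep_mu_le (t : List (String × List (String × List String))) (ts : List String)
    (hts : ∀ x ∈ ts, x ∈ pvUniv t) (c q : List String) :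
    pvMu t (pvStep c q ts).1 (pvStep c q ts).2 ≤ pvMu t c q := by
  induction ts generalizing c q with
  | nil => simp [pvStep]
  | cons v rest ih =>
    have hv : v ∈ pvUniv t := hts v (by simp)
    have hrest : ∀ x ∈ rest, x ∈ pvUniv t := fun x hx => hts x (by simp [hx])
    by_cases hvc : v ∈ c
    · rw [pvStep_cons_mem c q v rest hvc]; exact ih hrest c q
    · rw [pvStep_cons_not_mem c q v rest hvc]
      calc pvMu t (pvStep (c ++ [v]) (q ++ [v]) rest).1 (pvStep (c ++ [v]) (q ++ [v]) rest).2
          ≤ pvMu t (c ++ [v]) (q ++ [v]) := ih hrest _ _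
        _ ≤ pvMu t c q := by
            unfold pvMu
            have h1 : (c ++ [v]).toFinset = insert v c.toFinset := by
              ext y; simp
            rw [h1, Finset.sdiff_insert,
              Finset.card_erase_of_mem (by simp [Finset.mem_sdiff, hv, hvc])]
            have hpos : 0 < ((pvUniv t).toFinset \ c.toFinset).card :=
              Finset.card_pos.2 ⟨v, by simp [Finset.mem_sdiff, hv, hvc]⟩
            simp only [List.length_append, List.length_singleton]
            omega

-- process_epsilon_closure: BFS with a FIFO queue (popleft)
def pvBfs (t : List (String × List (String × List String))) (c q : List String) : List String :=
  match q with
  | [] => c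
  | cur :: rest =>
    let p := pvStep c rest (pvTargetsA t cur "$")
    pvBfs t p.1 p.2
termination_by pvMu t c q
decreasing_by
  have h := pvStep_mu_le t (pvTargetsA t cur "$") (fun x hx => pvTargetsA_mem_univ t cur "$" x hx) c rest
  have : pvMu t c rest < pvMu t c (cur :: rest) := by unfold pvMu; simp
  omega

def nfa_result (inputs : List String) (start_state : String) (transitions : List (String × List (String × List String))) : List String :=
  inputs.foldl (fun results input_str =>
    let symbols := if input_str ≠ "" then (PySem.Str.split? input_str ",").getD [] else []
    let start_set := PySem.Set.add PySem.Set.empty start_state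
    let current_states := pvBfs transitions start_set start_set
    let first_entry :=
      if current_states ≠ [] then
        PySem.Str.join "," (PySem.List.sorted current_states (fun s => s) false)
      else "#"
    let st := symbols.foldl (fun (p : List String × List String) symbol =>
      let next_states := p.1.foldl (fun ns state => PySem.Set.update ns (pvTargetsA transitions state symbol)) PySem.Set.empty
      let cur := pvBfs transitions next_states next_states
      let entry :=
        if cur ≠ [] then
          PySem.Str.join "," (PySem.List.sorted cur (fun s => s) false)
        else "#"
      (cur, p.2 ++ [entry])) (current_states, [first_entry])
    results ++ [PySem.Str.join "|" st.2]) []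

-- ===== PORT B =====

-- transitions.get(u, {}).get(sym, [])
def pvTargetsB (transitions : List (String × List (String × List String))) (u sym : String) : List String :=
  (PySem.Dict.mk ((PySem.Dict.mk transitions).getD u [])).getD sym []

-- universe = {v for m in transitions.values() for v in m.get('$', [])}
def pvEpsUniv (t : List (String × List (String × List String))) : List String :=
  PySem.Set.ofList (((PySem.Dict.mk t).values).flatMap (fun m => (PySem.Dict.mk m).getD "$" []))

-- one saturation round: c = c | {v for u in c for v in transitions.get(u, {}).get('$', [])}
def pvExpand (t : List (String × List (String × List String))) (c : List String) : List String :=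
  PySem.Set.union c (PySem.Set.ofList (c.flatMap (fun u => pvTargetsB t u "$")))

-- the 'for _ in range(fuel)' saturation loop
def pvSat (t : List (String × List (String × List String))) : Nat → List String → List String
  | 0, c => c
  | n + 1, c => pvSat t n (pvExpand t c)

def pvClosureOf (t : List (String × List (String × List String))) (s : String) : List String :=
  pvSat t (pvEpsUniv t).length [s]

-- table = {s: closure_of(s) for s in transitions}
def pvTable (t : List (String × List (String × List String))) : PySem.Dict String (List String) :=
  (PySem.List.dedup (t.map (fun p => p.1))).foldl (fun d s => d.insert s (pvClosureOf t s)) PySem.Dict.empty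

-- close(states) = union of table entries; a state without an entry closes to itself
def pvClose (tbl : PySem.Dict String (List String)) (states : List String) : List String :=
  states.foldl (fun out st => PySem.Set.union out (tbl.getD st [st])) PySem.Set.empty

def pvFmt (states : List String) : String :=
  if states ≠ [] then PySem.Str.join "," (PySem.List.sorted states (fun s => s) false) else "#"

-- run(cur, syms): the entry for cur, then recurse on the rest of the symbols
def pvRun (t : List (String × List (String × List String))) (tbl : PySem.Dict String (List String)) :
    List String → List String → List String
  | cur, [] => [pvFmt cur]
  | cur, sym :: rest =>
    pvFmt cur :: pvRun t tbl (pvClose tbl (PySem.Set.ofList (cur.flatMap (fun st => pvTargetsB t st sym)))) rest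

def nfa_result_alt (inputs : List String) (start_state : String) (transitions : List (String × List (String × List String))) : List String :=
  let tbl := pvTable transitions
  inputs.map (fun inp =>
    PySem.Str.join "|" (pvRun transitions tbl (pvClose tbl [start_state])
      (if inp ≠ "" then (PySem.Str.split? inp ",").getD [] else [])))

-- ===== PRECONDITION & SPEC =====
def Spec_nfa_result (inputs : List String) (start_state : String) (transitions : List (String × List (String × List String))) (out : List String) : Prop := out = nfa_result_alt inputs start_state transitions
instance (inputs : List String) (start_state : String) (transitions : List (String × List (String × List String))) (out : List String) : Decidable (Spec_nfa_result inputs start_state transitions out) := by unfold Spec_nfa_result; infer_instance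

-- ===== CLAIM (what is proved, stated in full; the proofs are below) =====
def Claim_equal_nfa_result : Prop := ∀ (inputs : List String) (start_state : String) (transitions : List (String × List (String × List String))), Dom_nfa_result inputs start_state transitions → Spec_nfa_result inputs start_state transitions (nfa_result inputs start_state transitions)

-- ===== LEMMAS AND PROOFS =====

def pvEpsStep (t : List (String × List (String × List String))) (a b : String) : Prop :=
  b ∈ pvTargetsA t a "$"

def pvReach (t : List (String × List (String × List String))) : String → String → Prop :=
  Relation.ReflTransGen (pvEpsStep t)

theorem pvTargetsB_eq (t : List (String × List (String × List String))) (u sym : String) :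
    pvTargetsB t u sym = pvTargetsA t u sym := by
  unfold pvTargetsA pvTargetsB
  cases h1 : (PySem.Dict.mk t).get? u with
  | none => simp [PySem.Dict.getD_eq_get?_getD, h1]; rfl
  | some m =>
    cases h2 : (PySem.Dict.mk m).get? sym with
    | none => simp [PySem.Dict.getD_eq_get?_getD, h1, h2]
    | some l => simp [PySem.Dict.getD_eq_get?_getD, h1, h2]

-- ----- facts about A's inner worklist step -----

theorem pvStep_mem_fst (ts c q : List String) (x : String) :
    x ∈ (pvStep c q ts).1 ↔ x ∈ c ∨ x ∈ ts := by
  induction ts generalizing c q with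
  | nil => simp [pvStep]
  | cons v rest ih =>
    by_cases hv : v ∈ c
    · rw [pvStep_cons_mem c q v rest hv, ih]
      constructor
      · rintro (h | h)
        · exact Or.inl h
        · exact Or.inr (List.mem_cons_of_mem v h)
      · rintro (h | h)
        · exact Or.inl h
        · rcases List.mem_cons.1 h with rfl | h
          · exact Or.inl hv
          · exact Or.inr h
    · rw [pvStep_cons_not_mem c q v rest hv, ih]
      simp [or_assoc, or_left_comm]

theorem pvStep_mem_snd (ts c q : List String) (x : String) (hx : x ∈ (pvStep c q ts).2) :
    x ∈ q ∨ x ∈ ts := by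
  induction ts generalizing c q with
  | nil => simp [pvStep] at hx; simp [hx]
  | cons v rest ih =>
    by_cases hv : v ∈ c
    · rw [pvStep_cons_mem c q v rest hv] at hx
      have := ih c q hx
      tauto
    · rw [pvStep_cons_not_mem c q v rest hv] at hx
      rcases ih _ _ hx with h | h
      · rcases List.mem_append.1 h with h | h
        · exact Or.inl h
        · simp at h; simp [h]
      · simp [h]

theorem pvStep_subset_snd (ts c q : List String) (x : String) (hx : x ∈ q) :
    x ∈ (pvStep c q ts).2 := by
  induction ts generalizing c q with
  | nil => simpa [pvStep]
  | cons v rest ih =>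
    by_cases hv : v ∈ c
    · rw [pvStep_cons_mem c q v rest hv]; exact ih c q hx
    · rw [pvStep_cons_not_mem c q v rest hv]
      exact ih _ _ (by simp [hx])

theorem pvStep_snd_sub_fst (ts c q : List String) (hq : ∀ u ∈ q, u ∈ c) (x : String)
    (hx : x ∈ (pvStep c q ts).2) : x ∈ (pvStep c q ts).1 := by
  induction ts generalizing c q with
  | nil => simp [pvStep] at hx ⊢; exact hq x hx
  | cons v rest ih =>
    by_cases hv : v ∈ c
    · have e := pvStep_cons_mem c q v rest hv
      rw [e] at hx ⊢; exact ih c q hq hx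
    · have e := pvStep_cons_not_mem c q v rest hv
      rw [e] at hx ⊢
      refine ih _ _ (fun u hu => ?_) hx
      rcases List.mem_append.1 hu with h | h
      · simp [hq u h]
      · simp at h; simp [h]

theorem pvStep_nodup (ts c q : List String) (hc : c.Nodup) : (pvStep c q ts).1.Nodup := by
  induction ts generalizing c q with
  | nil => simpa [pvStep]
  | cons v rest ih =>
    by_cases hv : v ∈ c
    · have e := pvStep_cons_mem c q v rest hv
      rw [e]; exact ih c q hc
    · have e := pvStep_cons_not_mem c q v rest hv
      rw [e]
      refine ih _ _ ?_
      rw [List.nodup_append]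
      refine ⟨hc, List.nodup_singleton v, ?_⟩
      intro a ha b hb
      simp at hb
      subst hb
      exact fun h => hv (h ▸ ha)

theorem pvStep_new_in_snd (ts c q : List String) (x : String)
    (hx : x ∈ (pvStep c q ts).1) : x ∈ c ∨ x ∈ (pvStep c q ts).2 := by
  induction ts generalizing c q with
  | nil => simp [pvStep] at hx; simp [pvStep, hx]
  | cons v rest ih =>
    by_cases hv : v ∈ c
    · have e := pvStep_cons_mem c q v rest hv
      rw [e] at hx ⊢; exact ih c q hx
    · have e := pvStep_cons_not_mem c q v rest hv
      rw [e] at hx ⊢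
      rcases ih _ _ hx with h | h
      · rcases List.mem_append.1 h with h | h
        · exact Or.inl h
        · simp at h; subst h
          exact Or.inr (pvStep_subset_snd _ _ _ _ (by simp))
      · exact Or.inr h

-- ----- BFS (port A) -----

theorem pvBfs_sound (t : List (String × List (String × List String))) (P : String → Prop)
    (hP : ∀ a b, P a → pvEpsStep t a b → P b) :
    ∀ c q, (∀ u ∈ c, P u) → (∀ u ∈ q, P u) → ∀ x ∈ pvBfs t c q, P x := by
  intro c q
  induction c, q using pvBfs.induct t with
  | case1 c => intro hc _ x hx; exact hc x (by simpa [pvBfs] using hx)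
  | case2 c cur rest p ih =>
    intro hc hq x hx
    rw [pvBfs] at hx
    refine ih ?_ ?_ x hx
    · intro u hu
      rcases (pvStep_mem_fst _ _ _ u).1 hu with h | h
      · exact hc u h
      · exact hP cur u (hq cur (by simp)) h
    · intro u hu
      rcases pvStep_mem_snd _ _ _ u hu with h | h
      · exact hq u (by simp [h])
      · exact hP cur u (hq cur (by simp)) h

theorem pvBfs_mono (t : List (String × List (String × List String))) :
    ∀ c q x, x ∈ c → x ∈ pvBfs t c q := by
  intro c q
  induction c, q using pvBfs.induct t with
  | case1 c => intro x hx; simpa [pvBfs]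
  | case2 c cur rest p ih =>
    intro x hx
    rw [pvBfs]
    exact ih x ((pvStep_mem_fst _ _ _ x).2 (Or.inl hx))

theorem pvBfs_closed (t : List (String × List (String × List String))) :
    ∀ c q, (∀ u ∈ q, u ∈ c) →
      (∀ u ∈ c, u ∈ q ∨ ∀ v, pvEpsStep t u v → v ∈ c) →
      ∀ u ∈ pvBfs t c q, ∀ v, pvEpsStep t u v → v ∈ pvBfs t c q := by
  intro c q
  induction c, q using pvBfs.induct t with
  | case1 c =>
    intro _ h2 u hu v hv
    rw [pvBfs] at hu ⊢
    rcases h2 u hu with h | h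
    · simp at h
    · exact h v hv
  | case2 c cur rest p ih =>
    intro hq h2 u hu v hv
    rw [pvBfs] at hu ⊢
    refine ih ?_ ?_ u hu v hv
    · exact fun w hw => pvStep_snd_sub_fst _ _ _ (fun z hz => hq z (by simp [hz])) w hw
    · intro w hw
      rcases pvStep_new_in_snd _ _ _ w hw with hwc | hwq
      · rcases h2 w hwc with hm | hcl
        · rcases List.mem_cons.1 hm with rfl | hm
          · exact Or.inr (fun v hv => (pvStep_mem_fst _ _ _ v).2 (Or.inr hv))
          · exact Or.inl (pvStep_subset_snd _ _ _ _ hm)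
        · exact Or.inr (fun v hv => (pvStep_mem_fst _ _ _ v).2 (Or.inl (hcl v hv)))
      · exact Or.inl hwq

theorem pvBfs_nodup (t : List (String × List (String × List String))) :
    ∀ c q, c.Nodup → (pvBfs t c q).Nodup := by
  intro c q
  induction c, q using pvBfs.induct t with
  | case1 c => intro h; simpa [pvBfs]
  | case2 c cur rest p ih =>
    intro h
    rw [pvBfs]
    exact ih (pvStep_nodup _ _ _ h)

theorem pvBfs_spec (t : List (String × List (String × List String))) (S : List String) (x : String) :
    x ∈ pvBfs t S S ↔ ∃ s ∈ S, pvReach t s x := by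
  constructor
  · intro hx
    refine pvBfs_sound t (fun y => ∃ s ∈ S, pvReach t s y) ?_ S S ?_ ?_ x hx
    · rintro a b ⟨s, hs, hr⟩ hstep
      exact ⟨s, hs, Relation.ReflTransGen.tail hr hstep⟩
    · exact fun u hu => ⟨u, hu, Relation.ReflTransGen.refl⟩
    · exact fun u hu => ⟨u, hu, Relation.ReflTransGen.refl⟩
  · rintro ⟨s, hs, hr⟩
    induction hr with
    | refl => exact pvBfs_mono t S S s hs
    | tail _ hstep ih =>
      exact pvBfs_closed t S S (fun u hu => hu) (fun u hu => Or.inl hu) _ ih _ hstep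

-- ----- saturation (port B) -----

theorem pvMem_expand (t : List (String × List (String × List String))) (c : List String) (x : String) :
    x ∈ pvExpand t c ↔ x ∈ c ∨ ∃ u ∈ c, pvEpsStep t u x := by
  unfold pvExpand
  rw [PySem.Set.mem_union, PySem.Set.mem_ofList, List.mem_flatMap]
  unfold pvEpsStep
  simp [pvTargetsB_eq]

theorem pvTargetsB_mem_epsUniv (t : List (String × List (String × List String))) (u x : String)
    (hx : x ∈ pvTargetsA t u "$") : x ∈ pvEpsUniv t := by
  unfold pvTargetsA at hx
  cases h1 : (PySem.Dict.mk t).get? u with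
  | none => simp [h1] at hx
  | some m =>
    cases h2 : (PySem.Dict.mk m).get? "$" with
    | none => simp [h1, h2] at hx
    | some l =>
      simp only [h1, h2] at hx
      have hmv : m ∈ (PySem.Dict.mk t).values := by
        have hm := PySem.Dict.mem_items_of_get?_eq_some _ h1
        simp only [PySem.Dict.values]
        exact List.mem_map.2 ⟨(u, m), hm, rfl⟩
      unfold pvEpsUniv
      rw [PySem.Set.mem_ofList]
      refine List.mem_flatMap.2 ⟨m, hmv, ?_⟩
      rw [PySem.Dict.getD_eq_get?_getD, h2]
      exact hx

theorem pvSat_sound (t : List (String × List (String × List String))) :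
    ∀ (fuel : Nat) (c : List String) (x : String), x ∈ pvSat t fuel c → ∃ s ∈ c, pvReach t s x := by
  intro fuel
  induction fuel with
  | zero => intro c x hx; exact ⟨x, hx, Relation.ReflTransGen.refl⟩
  | succ n ih =>
    intro c x hx
    obtain ⟨s, hs, hr⟩ := ih (pvExpand t c) x hx
    rcases (pvMem_expand t c s).1 hs with h | ⟨u, hu, hstep⟩
    · exact ⟨s, h, hr⟩
    · exact ⟨u, hu, Relation.ReflTransGen.head hstep hr⟩

theorem pvSat_mono (t : List (String × List (String × List String))) :
    ∀ (fuel : Nat) (c : List String) (x : String), x ∈ c → x ∈ pvSat t fuel c := by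
  intro fuel
  induction fuel with
  | zero => intro c x hx; exact hx
  | succ n ih =>
    intro c x hx
    exact ih (pvExpand t c) x ((pvMem_expand t c x).2 (Or.inl hx))

theorem pvSat_of_closed (t : List (String × List (String × List String))) :
    ∀ (fuel : Nat) (c : List String), (∀ u ∈ c, ∀ v, pvEpsStep t u v → v ∈ c) →
      ∀ x, x ∈ pvSat t fuel c ↔ x ∈ c := by
  intro fuel
  induction fuel with
  | zero => intro c _ x; exact Iff.rfl
  | succ n ih =>
    intro c hcl x
    have hexp : ∀ y, y ∈ pvExpand t c ↔ y ∈ c := by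
      intro y
      rw [pvMem_expand]
      constructor
      · rintro (h | ⟨u, hu, hstep⟩)
        · exact h
        · exact hcl u hu y hstep
      · exact Or.inl
    have hcl' : ∀ u ∈ pvExpand t c, ∀ v, pvEpsStep t u v → v ∈ pvExpand t c := by
      intro u hu v hv
      exact (hexp v).2 (hcl u ((hexp u).1 hu) v hv)
    calc x ∈ pvSat t n (pvExpand t c) ↔ x ∈ pvExpand t c := ih (pvExpand t c) hcl' x
      _ ↔ x ∈ c := hexp x

def pvMuE (t : List (String × List (String × List String))) (c : List String) : Nat :=
  ((pvEpsUniv t).toFinset \ c.toFinset).card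

theorem pvSat_closed (t : List (String × List (String × List String))) :
    ∀ (fuel : Nat) (c : List String), pvMuE t c ≤ fuel →
      ∀ u ∈ pvSat t fuel c, ∀ v, pvEpsStep t u v → v ∈ pvSat t fuel c := by
  intro fuel
  induction fuel with
  | zero =>
    intro c hm u hu v hv
    have hsub : (pvEpsUniv t).toFinset ⊆ c.toFinset := by
      rw [← Finset.sdiff_eq_empty_iff_subset]
      exact Finset.card_eq_zero.1 (Nat.le_zero.1 hm)
    have : v ∈ pvEpsUniv t := pvTargetsB_mem_epsUniv t u v hv
    have := hsub (List.mem_toFinset.2 this)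
    exact List.mem_toFinset.1 this
  | succ n ih =>
    intro c hm
    by_cases hcl : ∀ u ∈ c, ∀ v, pvEpsStep t u v → v ∈ c
    · intro u hu v hv
      have hiff := pvSat_of_closed t (n + 1) c hcl
      exact (hiff v).2 (hcl u ((hiff u).1 hu) v hv)
    · push Not at hcl
      obtain ⟨u, hu, v, hstep, hvc⟩ := hcl
      have hvU : v ∈ pvEpsUniv t := pvTargetsB_mem_epsUniv t u v hstep
      have hcsub : c.toFinset ⊆ (pvExpand t c).toFinset := by
        intro y hy
        exact List.mem_toFinset.2 ((pvMem_expand t c y).2 (Or.inl (List.mem_toFinset.1 hy)))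
      have hssub : (pvEpsUniv t).toFinset \ (pvExpand t c).toFinset ⊂ (pvEpsUniv t).toFinset \ c.toFinset := by
        refine Finset.ssubset_iff_of_subset (Finset.sdiff_subset_sdiff (Finset.Subset.refl _) hcsub) |>.2 ?_
        refine ⟨v, ?_, ?_⟩
        · exact Finset.mem_sdiff.2 ⟨List.mem_toFinset.2 hvU, fun h => hvc (List.mem_toFinset.1 h)⟩
        · intro h
          have := (Finset.mem_sdiff.1 h).2
          exact this (List.mem_toFinset.2 ((pvMem_expand t c v).2 (Or.inr ⟨u, hu, hstep⟩)))
      have hlt : pvMuE t (pvExpand t c) < pvMuE t c := Finset.card_lt_card hssub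
      exact ih (pvExpand t c) (by unfold pvMuE at hm hlt ⊢; omega)

theorem pvClosureOf_spec (t : List (String × List (String × List String))) (s x : String) :
    x ∈ pvClosureOf t s ↔ pvReach t s x := by
  constructor
  · intro hx
    obtain ⟨s', hs', hr⟩ := pvSat_sound t _ [s] x hx
    simp at hs'; subst hs'; exact hr
  · intro hr
    have hm : pvMuE t [s] ≤ (pvEpsUniv t).length := by
      unfold pvMuE
      calc ((pvEpsUniv t).toFinset \ [s].toFinset).card ≤ (pvEpsUniv t).toFinset.card :=
            Finset.card_le_card (Finset.sdiff_subset)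
        _ ≤ (pvEpsUniv t).length := List.toFinset_card_le _
    induction hr with
    | refl => exact pvSat_mono t _ [s] s (by simp)
    | tail _ hstep ih => exact pvSat_closed t _ [s] hm _ ih _ hstep

-- ----- the closure table and pvClose -----

theorem pvTargetsA_of_not_key (t : List (String × List (String × List String))) (u sym : String)
    (hu : u ∉ t.map (fun p => p.1)) : pvTargetsA t u sym = [] := by
  unfold pvTargetsA
  have : (PySem.Dict.mk t).get? u = none := by
    rw [PySem.Dict.get?_eq_none_iff_not_mem_keys]
    simpa [PySem.Dict.keys_mk] using hu
  rw [this]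

theorem pvReach_of_not_key (t : List (String × List (String × List String))) (u x : String)
    (hu : u ∉ t.map (fun p => p.1)) : pvReach t u x ↔ x = u := by
  constructor
  · intro h
    cases (Relation.ReflTransGen.cases_head h) with
    | inl h => exact h.symm
    | inr h =>
      obtain ⟨c, hc, _⟩ := h
      unfold pvEpsStep at hc
      rw [pvTargetsA_of_not_key t u "$" hu] at hc
      simp at hc
  · rintro rfl; exact Relation.ReflTransGen.refl

theorem pvTable_getD (t : List (String × List (String × List String))) (st : String) :
    (pvTable t).getD st [st] =
      if st ∈ PySem.List.dedup (t.map (fun p => p.1)) then pvClosureOf t st else [st] := by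
  unfold pvTable
  have hfresh : ∀ a ∈ PySem.List.dedup (t.map (fun p => p.1)),
      (PySem.Dict.empty : PySem.Dict String (List String)).contains a = false := by
    intro a _; simp [PySem.Dict.contains_empty]
  have hnd := PySem.List.nodup_dedup (t.map (fun p => p.1))
  have hitems := PySem.Dict.items_foldl_insert_fresh (PySem.List.dedup (t.map (fun p => p.1)))
    (fun s => s) (fun s => pvClosureOf t s) PySem.Dict.empty hfresh (by simp)
  by_cases hst : st ∈ PySem.List.dedup (t.map (fun p => p.1))
  · rw [if_pos hst]
    refine PySem.Dict.getD_of_mem_items _ ?_ ?_ _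
    · rw [hitems]
      refine List.mem_append.2 (Or.inr ?_)
      exact List.mem_map.2 ⟨st, hst, rfl⟩
    · have hk := PySem.Dict.nodup_keys_foldl_insert (PySem.List.dedup (t.map (fun p => p.1)))
        (fun _ s => pvClosureOf t s) PySem.Dict.empty (by simp)
      exact hk
  · rw [if_neg hst]
    refine PySem.Dict.getD_of_not_contains _ _ ?_
    rw [Bool.eq_false_iff]
    intro hcon
    rw [PySem.Dict.contains_iff_mem_keys, PySem.Dict.keys_foldl_insert] at hcon
    rcases (PySem.Set.mem_update _ _ _).1 hcon with h | h
    · simp [PySem.Dict.keys_empty] at h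
    · exact hst h

-- membership through a fold that only grows the accumulator set
theorem mem_foldl_grow {β : Type} (f : List String → β → List String) (Q : String → β → Prop)
    (hf : ∀ s a x, x ∈ f s a ↔ x ∈ s ∨ Q x a) (l : List β) (init : List String) (x : String) :
    x ∈ l.foldl f init ↔ x ∈ init ∨ ∃ a ∈ l, Q x a := by
  induction l generalizing init with
  | nil => simp
  | cons a rest ih =>
    simp only [List.foldl_cons, ih, hf]
    constructor
    · rintro (⟨h | h⟩ | ⟨b, hb, h⟩)
      · exact Or.inl h
      · exact Or.inr ⟨a, by simp, h⟩
      · exact Or.inr ⟨b, by simp [hb], h⟩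
    · rintro (h | ⟨b, hb, h⟩)
      · exact Or.inl (Or.inl h)
      · rcases List.mem_cons.1 hb with rfl | hb
        · exact Or.inl (Or.inr h)
        · exact Or.inr ⟨b, hb, h⟩

theorem pvClose_mem (t : List (String × List (String × List String))) (S : List String) (x : String) :
    x ∈ pvClose (pvTable t) S ↔ ∃ s ∈ S, pvReach t s x := by
  unfold pvClose
  rw [mem_foldl_grow _ (fun x st => pvReach t st x)
    (fun s st y => by
      rw [PySem.Set.mem_union, pvTable_getD]
      by_cases hst : st ∈ PySem.List.dedup (t.map (fun p => p.1))
      · rw [if_pos hst, pvClosureOf_spec]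
      · rw [if_neg hst]
        have hkey : st ∉ t.map (fun p => p.1) := fun h => hst ((PySem.List.mem_dedup _ _).2 h)
        simp [pvReach_of_not_key t st y hkey])]
  simp

theorem pvClose_nodup (tbl : PySem.Dict String (List String)) (S : List String) :
    (pvClose tbl S).Nodup := by
  unfold pvClose
  have : ∀ (S : List String) (init : List String), init.Nodup → (S.foldl (fun out st => PySem.Set.union out (tbl.getD st [st])) init).Nodup := by
    intro S
    induction S with
    | nil => intro init hinit; simpa
    | cons a rest ih => intro init hinit; exact ih _ (PySem.Set.nodup_union _ _ hinit)
  exact this S [] (by simp)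

-- ----- putting the pieces together -----

theorem pvEntry_eq (cA cB : List String) (hA : cA.Nodup) (hB : cB.Nodup)
    (hm : ∀ x, x ∈ cA ↔ x ∈ cB) :
    (if cA ≠ [] then PySem.Str.join "," (PySem.List.sorted cA (fun s => s) false) else "#") = pvFmt cB := by
  unfold pvFmt
  have hperm : cA.Perm cB := (List.perm_ext_iff_of_nodup hA hB).2 hm
  have hnil : (cA = []) ↔ (cB = []) := by
    constructor
    · intro h; subst h; exact List.Perm.eq_nil hperm.symm
    · intro h; subst h; exact List.Perm.eq_nil hperm
  by_cases h : cA = []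
  · simp [h, hnil.1 h]
  · rw [if_pos h, if_pos (fun hc => h (hnil.2 hc))]
    congr 1
    exact PySem.List.sorted_eq_sorted_of_perm cA cB (fun s => s) (fun a b h => h) hperm

theorem pvNextA_mem (t : List (String × List (String × List String))) (cur : List String) (sym x : String) :
    x ∈ cur.foldl (fun ns s => PySem.Set.update ns (pvTargetsA t s sym)) PySem.Set.empty ↔
      ∃ s ∈ cur, x ∈ pvTargetsA t s sym := by
  rw [mem_foldl_grow _ (fun x s => x ∈ pvTargetsA t s sym)
    (fun ns s y => by rw [PySem.Set.mem_update])]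
  simp [PySem.Set.empty]

theorem pvNextA_nodup (t : List (String × List (String × List String))) (cur : List String) (sym : String) :
    (cur.foldl (fun ns s => PySem.Set.update ns (pvTargetsA t s sym)) PySem.Set.empty).Nodup := by
  have : ∀ (cur : List String) (init : List String), init.Nodup →
      (cur.foldl (fun ns s => PySem.Set.update ns (pvTargetsA t s sym)) init).Nodup := by
    intro cur
    induction cur with
    | nil => intro init hinit; simpa
    | cons a rest ih => intro init hinit; exact ih _ (PySem.Set.nodup_update _ _ hinit)
  exact this cur [] (by simp)

theorem pvNextB_mem (t : List (String × List (String × List String))) (cur : List String) (sym x : String) :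
    x ∈ PySem.Set.ofList (cur.flatMap (fun st => pvTargetsB t st sym)) ↔
      ∃ s ∈ cur, x ∈ pvTargetsA t s sym := by
  rw [PySem.Set.mem_ofList, List.mem_flatMap]
  simp [pvTargetsB_eq]

theorem pvRun_head (t : List (String × List (String × List String))) (tbl : PySem.Dict String (List String))
    (cur syms : List String) :
    pvRun t tbl cur syms = pvFmt cur :: (pvRun t tbl cur syms).tail := by
  cases syms <;> rfl

theorem pvLoop_run (t : List (String × List (String × List String))) :
    ∀ (symbols cA cB acc : List String),
      cA.Nodup → cB.Nodup → (∀ x, x ∈ cA ↔ x ∈ cB) →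
      (symbols.foldl (fun (p : List String × List String) symbol =>
        let next_states := p.1.foldl (fun ns state => PySem.Set.update ns (pvTargetsA t state symbol)) PySem.Set.empty
        let cur := pvBfs t next_states next_states
        let entry := if cur ≠ [] then PySem.Str.join "," (PySem.List.sorted cur (fun s => s) false) else "#"
        (cur, p.2 ++ [entry])) (cA, acc)).2 =
      acc ++ (pvRun t (pvTable t) cB symbols).tail := by
  intro symbols
  induction symbols with
  | nil => intro cA cB acc _ _ _; simp [pvRun]
  | cons sym rest ih =>
    intro cA cB acc hA hB hm
    simp only [List.foldl_cons, pvRun]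
    set nA := cA.foldl (fun ns s => PySem.Set.update ns (pvTargetsA t s sym)) PySem.Set.empty with hnA
    set cB' := pvClose (pvTable t) (PySem.Set.ofList (cB.flatMap (fun st => pvTargetsB t st sym))) with hcB'
    have hcm : ∀ x, x ∈ pvBfs t nA nA ↔ x ∈ cB' := by
      intro x
      rw [hnA, hcB', pvBfs_spec, pvClose_mem]
      constructor
      · rintro ⟨s, hs, hr⟩
        obtain ⟨u, hu, hx⟩ := (pvNextA_mem t cA sym s).1 hs
        exact ⟨s, (pvNextB_mem t cB sym s).2 ⟨u, (hm u).1 hu, hx⟩, hr⟩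
      · rintro ⟨s, hs, hr⟩
        obtain ⟨u, hu, hx⟩ := (pvNextB_mem t cB sym s).1 hs
        exact ⟨s, (pvNextA_mem t cA sym s).2 ⟨u, (hm u).2 hu, hx⟩, hr⟩
    have hcA : (pvBfs t nA nA).Nodup := pvBfs_nodup t _ _ (pvNextA_nodup t cA sym)
    have hcB : cB'.Nodup := pvClose_nodup _ _
    have hentry := pvEntry_eq _ _ hcA hcB hcm
    rw [hentry]
    rw [ih _ cB' _ hcA hcB hcm]
    rw [pvRun_head t (pvTable t) cB' rest]
    simp

-- ===== VERDICT (by name: the statement is the Claim_ definition above) =====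
theorem nfa_result_spec : Claim_equal_nfa_result := by
  intro inputs start_state transitions _
  unfold Spec_nfa_result nfa_result nfa_result_alt
  simp only []
  rw [PySem.List.foldl_append_singleton_eq_map]
  simp only [List.nil_append]
  apply List.map_congr_left
  intro input_str _
  have hstart : (PySem.Set.add PySem.Set.empty start_state) = [start_state] := rfl
  rw [hstart]
  have hm0 : ∀ x, x ∈ pvBfs transitions [start_state] [start_state] ↔
      x ∈ pvClose (pvTable transitions) [start_state] := by
    intro x; rw [pvBfs_spec, pvClose_mem]
  have hA0 : (pvBfs transitions [start_state] [start_state]).Nodup := pvBfs_nodup transitions _ _ (by simp)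
  have hB0 : (pvClose (pvTable transitions) [start_state]).Nodup := pvClose_nodup _ _
  have hfirst := pvEntry_eq _ _ hA0 hB0 hm0
  rw [hfirst]
  rw [pvLoop_run transitions _ _ _ _ hA0 hB0 hm0]
  rw [pvRun_head transitions (pvTable transitions) (pvClose (pvTable transitions) [start_state])]
  simp
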